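-- pv_equiv track=rewrite | github.com/biswa-d/vestim_micros | vestim/gateway/src/training_setup_manager_qt.py | calculate_learnable_parameters
-- ===== SOURCE A (Python) =====
-- def calculate_learnable_parameters(layers, input_size, hidden_units, model_type="LSTM", layer_sizes=None):
--     """
--     Calculate the number of learnable parameters for RNN models (LSTM or GRU).
--
--     :param layers: Number of layers (an integer representing the number of RNN layers)
--     :param input_size: The size of the input features (e.g., 3 for [SOC, Current, Temp])
--     :param hidden_units: An integer representing the number of hidden units (used if layer_sizes not provided)
--     :param model_type: Type of model ("LSTM" or "GRU")
--     :param layer_sizes: Optional list of hidden units per layer (e.g., [16, 12] for variable sizes)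
--     :return: Total number of learnable parameters
--     """
--
--     # Initialize the number of parameters
--     learnable_params = 0
--
--     if model_type == "GRU":
--         # GRU has 3 gates: reset, update, and new gate (fewer than LSTM's 4)
--         gates = 3
--     else:  # LSTM or default
--         # LSTM has 4 gates: input, forget, output, and candidate gates
--         gates = 4
--
--     # If layer_sizes provided, use variable layer sizes; otherwise use uniform hidden_units
--     if layer_sizes is None:
--         layer_sizes = [hidden_units] * layers
--
--     # Input-to-hidden weights for the first layer
--     # For LSTM: 4 * hidden_units * (input_size + hidden_units)
--     # For GRU: 3 * hidden_units * (input_size + hidden_units)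
--     first_layer_hidden = layer_sizes[0]
--     input_layer_params = gates * (input_size + first_layer_hidden) * first_layer_hidden
--     input_layer_bias = gates * first_layer_hidden
--     learnable_params += input_layer_params + input_layer_bias
--
--     # For each additional layer, input is previous layer's hidden size
--     for i in range(1, len(layer_sizes)):
--         prev_hidden = layer_sizes[i - 1]
--         curr_hidden = layer_sizes[i]
--         hidden_layer_params = gates * (prev_hidden + curr_hidden) * curr_hidden
--         hidden_layer_bias = gates * curr_hidden
--         learnable_params += hidden_layer_params + hidden_layer_bias
--
--     # Output layer (assuming 1 output) - uses last layer's hidden size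
--     output_size = 1
--     last_layer_hidden = layer_sizes[-1]
--     output_layer_params = last_layer_hidden * output_size
--     output_layer_bias = output_size
--     learnable_params += output_layer_params + output_layer_bias
--
--     return learnable_params
-- ===== SOURCE B (Python) =====
-- def calculate_learnable_parameters(layers, input_size, hidden_units, model_type="LSTM", layer_sizes=None):
--     gates = 3 if model_type == "GRU" else 4
--     if layer_sizes is None:
--         # uniform layers: closed form, no per-layer list or loop at all
--         h = hidden_units
--         return gates * h * (input_size + h + 1) + (layers - 1) * gates * h * (2 * h + 1) + h + 1
--     total = layer_sizes[-1] + 1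
--     prev = input_size
--     for c in layer_sizes:
--         total += gates * c * (prev + c + 1)
--         prev = c
--     return total
-- ===== Notes on version B (the rewrite author's own statement) =====
-- stated objective: alternative
-- what changed: The uniform branch (layer_sizes=None) is replaced by an O(1) closed form that never builds a list or loops; the explicit-list branch becomes a single running-accumulator pass over the elements with the factored per-layer term gates*c*(prev+c+1), with no index arithmetic.
import Mathlib
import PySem

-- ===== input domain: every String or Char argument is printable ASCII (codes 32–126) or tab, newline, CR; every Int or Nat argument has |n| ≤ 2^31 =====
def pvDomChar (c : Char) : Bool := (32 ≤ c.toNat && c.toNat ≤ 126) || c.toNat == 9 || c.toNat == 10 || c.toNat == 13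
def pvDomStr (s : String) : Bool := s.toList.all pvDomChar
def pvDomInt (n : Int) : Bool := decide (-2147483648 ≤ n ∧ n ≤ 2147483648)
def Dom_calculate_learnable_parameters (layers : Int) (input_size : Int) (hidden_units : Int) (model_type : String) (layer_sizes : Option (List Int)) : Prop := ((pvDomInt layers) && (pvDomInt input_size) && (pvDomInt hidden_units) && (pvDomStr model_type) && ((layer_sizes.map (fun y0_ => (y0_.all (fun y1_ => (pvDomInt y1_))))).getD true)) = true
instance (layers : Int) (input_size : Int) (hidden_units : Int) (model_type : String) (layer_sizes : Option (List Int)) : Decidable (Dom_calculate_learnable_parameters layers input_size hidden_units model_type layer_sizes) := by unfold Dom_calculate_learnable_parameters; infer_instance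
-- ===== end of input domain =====

-- B replaces the list-building uniform branch by a closed form and the indexed loop by a
-- running-accumulator pass with a factored per-layer term (objective: alternative).


-- ===== PORT A =====
-- body of A's 'for i in range(1, len(layer_sizes))' loop (indices into the full list ls)
def pvStepA (gates : Int) (ls : List Int) (acc i : Int) : Int :=
  let prev := (PySem.List.pyGet? ls (i - 1)).getD 0
  let curr := (PySem.List.pyGet? ls i).getD 0
  acc + (gates * (prev + curr) * curr + gates * curr)

def calculate_learnable_parameters (layers : Int) (input_size : Int) (hidden_units : Int) (model_type : String) (layer_sizes : Option (List Int)) : Int :=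
  let gates : Int := if model_type == "GRU" then 3 else 4
  let ls : List Int := match layer_sizes with
    | none => List.replicate layers.toNat hidden_units   -- [hidden_units] * layers
    | some l => l
  let first_layer_hidden := (PySem.List.pyGet? ls 0).getD 0   -- IndexError ⇔ ls = [] (excluded by Pre_)
  let learnable_params :=
    gates * (input_size + first_layer_hidden) * first_layer_hidden + gates * first_layer_hidden
  let learnable_params :=
    (PySem.List.pyRange 1 (ls.length : Int) 1).foldl (pvStepA gates ls) learnable_params
  let last_layer_hidden := (PySem.List.pyGet? ls (-1)).getD 0
  learnable_params + (last_layer_hidden * 1 + 1)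

-- ===== PORT B =====
def calculate_learnable_parameters_alt (layers : Int) (input_size : Int) (hidden_units : Int) (model_type : String) (layer_sizes : Option (List Int)) : Int :=
  let gates : Int := if model_type == "GRU" then 3 else 4
  match layer_sizes with
  | none =>
      -- uniform layers: closed form, no per-layer list or loop at all
      gates * hidden_units * (input_size + hidden_units + 1)
        + (layers - 1) * gates * hidden_units * (2 * hidden_units + 1)
        + hidden_units + 1
  | some l =>
      let total0 := (PySem.List.pyGet? l (-1)).getD 0 + 1   -- layer_sizes[-1]; IndexError ⇔ l = [] (excluded by Pre_)
      (l.foldl (fun (s : Int × Int) c => (s.1 + gates * c * (s.2 + c + 1), c)) (total0, input_size)).1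

-- ===== PRECONDITION & SPEC =====
-- Pre_ excludes exactly the inputs where the effective layer list is empty: there A raises IndexError.
def Pre_calculate_learnable_parameters (layers : Int) (input_size : Int) (hidden_units : Int) (model_type : String) (layer_sizes : Option (List Int)) : Prop :=
  0 < (layer_sizes.map List.length).getD layers.toNat
instance (layers : Int) (input_size : Int) (hidden_units : Int) (model_type : String) (layer_sizes : Option (List Int)) : Decidable (Pre_calculate_learnable_parameters layers input_size hidden_units model_type layer_sizes) := by unfold Pre_calculate_learnable_parameters; infer_instance

def pvWitness_calculate_learnable_parameters : Int × Int × Int × String × Option (List Int) := (2, 3, 5, "LSTM", none)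

def Spec_calculate_learnable_parameters (layers : Int) (input_size : Int) (hidden_units : Int) (model_type : String) (layer_sizes : Option (List Int)) (out : Int) : Prop := out = calculate_learnable_parameters_alt layers input_size hidden_units model_type layer_sizes
instance (layers : Int) (input_size : Int) (hidden_units : Int) (model_type : String) (layer_sizes : Option (List Int)) (out : Int) : Decidable (Spec_calculate_learnable_parameters layers input_size hidden_units model_type layer_sizes out) := by unfold Spec_calculate_learnable_parameters; infer_instance

-- ===== CLAIM (what is proved, stated in full; the proofs are below) =====
def Claim_equal_calculate_learnable_parameters : Prop := ∀ (layers : Int) (input_size : Int) (hidden_units : Int) (model_type : String) (layer_sizes : Option (List Int)), Dom_calculate_learnable_parameters layers input_size hidden_units model_type layer_sizes → Pre_calculate_learnable_parameters layers input_size hidden_units model_type layer_sizes → Spec_calculate_learnable_parameters layers input_size hidden_units model_type layer_sizes (calculate_learnable_parameters layers input_size hidden_units model_type layer_sizes)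

-- ===== LEMMAS AND PROOFS =====

-- the sum both loops compute: Σ gates*(prev+curr)*curr + gates*curr over adjacent pairs
def pvSumPairs (g prev : Int) : List Int → Int
  | [] => 0
  | c :: rest => g * (prev + c) * c + g * c + pvSumPairs g c rest

-- B's running-pair fold computes total0 + pvSumPairs
theorem pvFoldB (g : Int) : ∀ (l : List Int) (t p : Int),
    (l.foldl (fun (s : Int × Int) c => (s.1 + g * c * (s.2 + c + 1), c)) (t, p)).1
      = t + pvSumPairs g p l := by
  intro l
  induction l with
  | nil => intro t p; simp [pvSumPairs]
  | cons c rest ih =>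
      intro t p
      simp only [List.foldl_cons, ih, pvSumPairs]
      ring

-- A's indexed loop from index 1 computes the same sum
theorem pvLoopA (g : Int) : ∀ (xs pre : List Int) (x : Int) (acc : Int),
    (PySem.List.pyRange ((pre.length : Int) + 1) (((pre ++ x :: xs).length : Int)) 1).foldl
        (pvStepA g (pre ++ x :: xs)) acc
      = acc + pvSumPairs g x xs := by
  intro xs
  induction xs with
  | nil =>
      intro pre x acc
      rw [PySem.List.pyRange_one_eq_nil (by simp)]
      simp [pvSumPairs]
  | cons c rest ih =>
      intro pre x acc
      rw [PySem.List.pyRange_one_cons (by simp)]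
      rw [List.foldl_cons]
      have hstep : pvStepA g (pre ++ x :: c :: rest) acc ((pre.length : Int) + 1)
          = acc + (g * (x + c) * c + g * c) := by
        unfold pvStepA
        have h1 : ((pre.length : Int) + 1) - 1 = (pre.length : Int) := by ring
        have h2 : PySem.List.pyGet? (pre ++ x :: c :: rest) (pre.length : Int) = some x :=
          PySem.List.pyGet?_append_length pre (c :: rest) x
        have h3 : PySem.List.pyGet? (pre ++ x :: c :: rest) ((pre.length : Int) + 1) = some c := by
          have := PySem.List.pyGet?_append_length (pre ++ [x]) rest c
          simpa [List.append_assoc] using this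
        simp [h1, h2, h3]
      rw [hstep]
      have hre : pre ++ x :: c :: rest = (pre ++ [x]) ++ c :: rest := by
        simp [List.append_assoc]
      have hlen : (pre.length : Int) + 1 + 1 = (((pre ++ [x]).length : Int)) + 1 := by
        simp
      rw [hre, hlen]
      rw [ih (pre ++ [x]) c (acc + (g * (x + c) * c + g * c))]
      simp [pvSumPairs]; ring

-- A's whole value on a nonempty list, as first-layer term + pair sum + output term
theorem pvAval (g input_size x : Int) (xs : List Int) :
    (PySem.List.pyRange 1 (((x :: xs).length : Int)) 1).foldl (pvStepA g (x :: xs))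
        (g * (input_size + ((PySem.List.pyGet? (x :: xs) 0).getD 0)) * ((PySem.List.pyGet? (x :: xs) 0).getD 0)
          + g * ((PySem.List.pyGet? (x :: xs) 0).getD 0))
      + (((PySem.List.pyGet? (x :: xs) (-1)).getD 0) * 1 + 1)
    = g * (input_size + x) * x + g * x + pvSumPairs g x xs
      + ((PySem.List.pyGet? (x :: xs) (-1)).getD 0) + 1 := by
  have h0 : PySem.List.pyGet? (x :: xs) 0 = some x := PySem.List.pyGet?_zero_cons x xs
  have hA : (PySem.List.pyRange 1 (((x :: xs).length : Int)) 1).foldl (pvStepA g (x :: xs))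
        (g * (input_size + x) * x + g * x)
      = g * (input_size + x) * x + g * x + pvSumPairs g x xs := by
    simpa using pvLoopA g xs [] x (g * (input_size + x) * x + g * x)
  simp only [h0, Option.getD_some, mul_one]
  rw [hA]
  ring

-- last element of a nonempty constant list
theorem pvLastRepl (a : Int) : ∀ n : Nat, (a :: List.replicate n a).getLast? = some a := by
  intro n
  induction n with
  | zero => rfl
  | succ m ih => simpa [List.replicate] using ih

-- the pair sum over a constant list
theorem pvSumRepl (g h : Int) : ∀ n : Nat,
    pvSumPairs g h (List.replicate n h) = n * (g * (h + h) * h + g * h) := by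
  intro n
  induction n with
  | zero => simp [pvSumPairs]
  | succ m ih =>
      simp only [List.replicate, pvSumPairs, ih]
      push_cast
      ring

-- ===== VERDICT (by name: the statement is the Claim_ definition above) =====
theorem calculate_learnable_parameters_spec : Claim_equal_calculate_learnable_parameters := by
  intro layers input_size hidden_units model_type layer_sizes _ hpre
  unfold Spec_calculate_learnable_parameters
  cases layer_sizes with
  | none =>
      simp only [Pre_calculate_learnable_parameters, Option.map_none, Option.getD_none] at hpre
      simp only [calculate_learnable_parameters, calculate_learnable_parameters_alt]
      obtain ⟨n, hn⟩ : ∃ n, layers.toNat = n + 1 := ⟨layers.toNat - 1, by omega⟩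
      have hlay : layers = (n : Int) + 1 := by omega
      simp only [hn, List.replicate]
      rw [pvAval]
      have hlast : PySem.List.pyGet? (hidden_units :: List.replicate n hidden_units) (-1)
          = some hidden_units := by
        rw [PySem.List.pyGet?_neg_one]
        exact pvLastRepl hidden_units n
      rw [hlast, pvSumRepl, hlay]
      simp only [Option.getD_some]
      ring
  | some l =>
      simp only [Pre_calculate_learnable_parameters, Option.map_some, Option.getD_some] at hpre
      cases l with
      | nil => exact absurd hpre (by decide)
      | cons x xs =>
          simp only [calculate_learnable_parameters, calculate_learnable_parameters_alt]
          rw [pvAval, pvFoldB]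
          simp only [pvSumPairs]
          ring
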